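-- pv_equiv track=rewrite | github.com/ParsaHaji09/c122-projects | project1c/project1c_code.py | map_genomes
-- ===== SOURCE A (Python) =====
-- def map_genomes(reads, genomes):
--     reads_to_genome = {}
--     genome_to_reads = {}
--
--     for genome_number, genome in genomes.items():
--         kmer_genome_positions = {}
--         for i in range(len(genome) - 16 + 1):
--             kmer = genome[i:i + 16]
--             if kmer not in kmer_genome_positions:
--                 kmer_genome_positions[kmer] = [i]
--             else:
--                 kmer_genome_positions[kmer].append(i)
--
--         for i, read in enumerate(reads):
--             kmers_read = [read[j:j+16] for j in range(0, len(read) - 16 + 1)]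
--             for kmer in kmers_read:
--                 if kmer in kmer_genome_positions:
--                     if i not in reads_to_genome:
--                         reads_to_genome[i] = []
--                     reads_to_genome[i].append(genome_number)
--
--                     if genome_number not in genome_to_reads:
--                         genome_to_reads[genome_number] = []
--                     genome_to_reads[genome_number].append(i)
--                     break
--
--     return reads_to_genome, genome_to_reads
-- ===== SOURCE B (Python) =====
-- def map_genomes(reads, genomes):
--     # inverted index: 16-mer -> set of indices of the reads containing it
--     kmer_to_reads = {}
--     for i, read in enumerate(reads):
--         for j in range(len(read) - 15):
--             kmer_to_reads.setdefault(read[j:j + 16], set()).add(i)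
--
--     reads_to_genome = {}
--     genome_to_reads = {}
--     for genome_number, genome in genomes.items():
--         hits = set()
--         for i in range(len(genome) - 15):
--             hits.update(kmer_to_reads.get(genome[i:i + 16], ()))
--         if hits:
--             matched = sorted(hits)
--             genome_to_reads[genome_number] = matched
--             for i in matched:
--                 reads_to_genome.setdefault(i, []).append(genome_number)
--     return reads_to_genome, genome_to_reads
-- ===== Notes on version B (the rewrite author's own statement) =====
-- stated objective: faster
-- what changed: Instead of rebuilding a 16-mer positions dict per genome and scanning every read against every genome, B builds one inverted 16-mer -> read-indices index over all reads, then each genome gathers its matching reads in one pass over its own 16-mers.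
import Mathlib
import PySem

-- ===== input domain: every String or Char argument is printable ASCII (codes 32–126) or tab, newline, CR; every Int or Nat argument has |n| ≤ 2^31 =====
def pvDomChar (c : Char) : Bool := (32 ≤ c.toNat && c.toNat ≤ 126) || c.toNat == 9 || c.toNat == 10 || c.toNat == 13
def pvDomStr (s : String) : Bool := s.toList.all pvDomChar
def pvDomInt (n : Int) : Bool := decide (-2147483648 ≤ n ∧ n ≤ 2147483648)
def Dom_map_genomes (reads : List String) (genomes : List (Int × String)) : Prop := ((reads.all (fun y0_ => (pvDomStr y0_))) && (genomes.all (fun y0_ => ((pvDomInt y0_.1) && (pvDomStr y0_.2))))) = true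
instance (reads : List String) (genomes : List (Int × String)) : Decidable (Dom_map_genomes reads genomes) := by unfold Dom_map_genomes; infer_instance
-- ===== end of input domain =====

-- B replaces A's per-genome 16-mer dict + scan of every read per genome by one inverted
-- 16-mer -> read-indices index built over the reads once; each genome then gathers its
-- matching reads from that index. Equal return value is proved for all inputs.

-- ===== PORT A =====
-- [read[j:j+16] for j in range(0, len(read) - 16 + 1)]
def pvKmers (s : String) : List String :=
  (PySem.List.pyRange 0 (PySem.Str.len s - 16 + 1) 1).map
    (fun j => PySem.Str.slice s (some j) (some (j + 16)))

-- 'for kmer in kmers_read: if kmer in kmer_genome_positions: ...; break'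
def pvBreakA (kgp : PySem.Dict String (List Int)) (gn i : Int)
    (st : PySem.Dict Int (List Int) × PySem.Dict Int (List Int)) :
    List String → PySem.Dict Int (List Int) × PySem.Dict Int (List Int)
  | [] => st
  | kmer :: rest =>
    if kgp.contains kmer then
      let r2g := if st.1.contains i then st.1 else st.1.insert i []
      let r2g := r2g.modify i [] (fun l => l ++ [gn])
      let g2r := if st.2.contains gn then st.2 else st.2.insert gn []
      let g2r := g2r.modify gn [] (fun l => l ++ [i])
      (r2g, g2r)
    else pvBreakA kgp gn i st rest

-- one iteration of A's outer 'for genome_number, genome in genomes.items():'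
def pvGenomeStepA (reads : List String)
    (st : PySem.Dict Int (List Int) × PySem.Dict Int (List Int)) (gp : Int × String) :
    PySem.Dict Int (List Int) × PySem.Dict Int (List Int) :=
  let kgp := (PySem.List.pyRange 0 (PySem.Str.len gp.2 - 16 + 1) 1).foldl
    (fun (d : PySem.Dict String (List Int)) i =>
      let kmer := PySem.Str.slice gp.2 (some i) (some (i + 16))
      if ¬ d.contains kmer then d.insert kmer [i]
      else d.modify kmer [] (fun l => l ++ [i]))
    PySem.Dict.empty
  (PySem.List.enumerate reads 0).foldl
    (fun st ir => pvBreakA kgp gp.1 ir.1 st (pvKmers ir.2)) st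

def map_genomes (reads : List String) (genomes : List (Int × String)) :
    (List (Int × List Int)) × (List (Int × List Int)) :=
  -- 'genomes' is the dict the Python function receives; '.items()' iterates it
  let st := (PySem.Dict.ofList genomes).items.foldl (pvGenomeStepA reads)
    (PySem.Dict.empty, PySem.Dict.empty)
  (st.1.items, st.2.items)

-- ===== PORT B =====
-- kmer_to_reads: 'kmer_to_reads.setdefault(read[j:j+16], set()).add(i)' mutates the stored
-- set in place; ported exactly as Dict.modify with default Set.empty and Set.add.
def pvIndexB (reads : List String) : PySem.Dict String (PySem.Set Int) :=
  (PySem.List.enumerate reads 0).foldl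
    (fun idx ir =>
      (PySem.List.pyRange 0 (PySem.Str.len ir.2 - 15) 1).foldl
        (fun (idx : PySem.Dict String (PySem.Set Int)) j =>
          idx.modify (PySem.Str.slice ir.2 (some j) (some (j + 16))) PySem.Set.empty
            (fun s => PySem.Set.add s ir.1))
        idx)
    PySem.Dict.empty

-- one iteration of B's 'for genome_number, genome in genomes.items():'
-- ('kmer_to_reads.get(..., ())' supplies an empty iterable: ported as Set.empty)
def pvGenomeStepB (index : PySem.Dict String (PySem.Set Int))
    (st : PySem.Dict Int (List Int) × PySem.Dict Int (List Int)) (gp : Int × String) :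
    PySem.Dict Int (List Int) × PySem.Dict Int (List Int) :=
  let hits : PySem.Set Int :=
    (PySem.List.pyRange 0 (PySem.Str.len gp.2 - 15) 1).foldl
      (fun (hits : PySem.Set Int) i =>
        PySem.Set.update hits
          (index.getD (PySem.Str.slice gp.2 (some i) (some (i + 16))) PySem.Set.empty))
      PySem.Set.empty
  if hits.isEmpty then st
  else
    let matched := PySem.List.sorted hits (fun x => x) false
    let g2r := st.2.insert gp.1 matched
    let r2g := matched.foldl
      (fun (d : PySem.Dict Int (List Int)) i =>
        (d.setdefault i []).modify i [] (fun l => l ++ [gp.1])) st.1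
    (r2g, g2r)

def map_genomes_alt (reads : List String) (genomes : List (Int × String)) :
    (List (Int × List Int)) × (List (Int × List Int)) :=
  let index := pvIndexB reads
  let st := (PySem.Dict.ofList genomes).items.foldl (pvGenomeStepB index)
    (PySem.Dict.empty, PySem.Dict.empty)
  (st.1.items, st.2.items)

-- ===== PRECONDITION & SPEC =====
def Spec_map_genomes (reads : List String) (genomes : List (Int × String)) (out : (List (Int × List Int)) × (List (Int × List Int))) : Prop := out = map_genomes_alt reads genomes
instance (reads : List String) (genomes : List (Int × String)) (out : (List (Int × List Int)) × (List (Int × List Int))) : Decidable (Spec_map_genomes reads genomes out) := by unfold Spec_map_genomes; infer_instance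

-- ===== CLAIM =====
def Claim_equal_map_genomes : Prop := ∀ (reads : List String) (genomes : List (Int × String)), Dom_map_genomes reads genomes → Spec_map_genomes reads genomes (map_genomes reads genomes)

-- ===== LEMMAS AND PROOFS =====

-- the state update A performs for a matching (read index i, genome number gn)
def pvUpd (gn : Int) (st : PySem.Dict Int (List Int) × PySem.Dict Int (List Int)) (i : Int) :
    PySem.Dict Int (List Int) × PySem.Dict Int (List Int) :=
  ((if st.1.contains i then st.1 else st.1.insert i []).modify i [] (fun l => l ++ [gn]),
   (if st.2.contains gn then st.2 else st.2.insert gn []).modify gn [] (fun l => l ++ [i]))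

-- the read indices matching genome g, in increasing order
def pvMatched (reads : List String) (g : String) : List Int :=
  ((PySem.List.enumerate reads 0).filter
    (fun ir => (pvKmers ir.2).any (fun k => (pvKmers g).contains k))).map (fun p => p.1)

lemma pvKgp_contains_aux (g : String) (l : List Int) (d : PySem.Dict String (List Int)) (k : String) :
    (l.foldl (fun (d : PySem.Dict String (List Int)) i =>
        let kmer := PySem.Str.slice g (some i) (some (i + 16))
        if ¬ d.contains kmer then d.insert kmer [i]
        else d.modify kmer [] (fun l => l ++ [i])) d).contains k
    = (d.contains k || (l.map (fun i => PySem.Str.slice g (some i) (some (i + 16)))).contains k) := by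
  induction l generalizing d with
  | nil => simp
  | cons i rest ih =>
    simp only [List.foldl_cons, List.map_cons, List.contains_cons, ih]
    split
    · rw [PySem.Dict.contains_insert]
      cases h1 : k == PySem.Str.slice g (some i) (some (i + 16)) <;> cases h2 : d.contains k <;> simp
    · rw [PySem.Dict.contains_modify]
      cases h1 : k == PySem.Str.slice g (some i) (some (i + 16)) <;> cases h2 : d.contains k <;> simp

lemma pvKgp_contains (g k : String) :
    ((PySem.List.pyRange 0 (PySem.Str.len g - 16 + 1) 1).foldl
      (fun (d : PySem.Dict String (List Int)) i =>
        let kmer := PySem.Str.slice g (some i) (some (i + 16))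
        if ¬ d.contains kmer then d.insert kmer [i]
        else d.modify kmer [] (fun l => l ++ [i])) PySem.Dict.empty).contains k
    = (pvKmers g).contains k := by
  rw [pvKgp_contains_aux]
  simp [pvKmers, PySem.Dict.empty]

lemma pvBreakA_eq (kgp : PySem.Dict String (List Int)) (gn i : Int)
    (st : PySem.Dict Int (List Int) × PySem.Dict Int (List Int)) (l : List String) :
    pvBreakA kgp gn i st l = if l.any (fun k => kgp.contains k) then pvUpd gn st i else st := by
  induction l with
  | nil => simp [pvBreakA]
  | cons k rest ih =>
    by_cases h : kgp.contains k = true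
    · simp [pvBreakA, h, pvUpd]
    · simp only [Bool.not_eq_true] at h
      simp [pvBreakA, h, ih]

lemma pvStepA_eq (reads : List String) (gp : Int × String)
    (st : PySem.Dict Int (List Int) × PySem.Dict Int (List Int)) :
    pvGenomeStepA reads st gp = (pvMatched reads gp.2).foldl (pvUpd gp.1) st := by
  simp only [pvGenomeStepA, pvMatched]
  have h1 : (fun (st : PySem.Dict Int (List Int) × PySem.Dict Int (List Int)) (ir : Int × String) =>
      pvBreakA
      ((PySem.List.pyRange 0 (PySem.Str.len gp.2 - 16 + 1) 1).foldl
        (fun (d : PySem.Dict String (List Int)) i =>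
          let kmer := PySem.Str.slice gp.2 (some i) (some (i + 16))
          if ¬ d.contains kmer then d.insert kmer [i]
          else d.modify kmer [] (fun l => l ++ [i])) PySem.Dict.empty)
      gp.1 ir.1 st (pvKmers ir.2))
      = (fun (st : PySem.Dict Int (List Int) × PySem.Dict Int (List Int)) (ir : Int × String) =>
          if (pvKmers ir.2).any (fun k => (pvKmers gp.2).contains k) then pvUpd gp.1 st ir.1 else st) := by
    funext st ir
    rw [pvBreakA_eq]
    simp only [pvKgp_contains]
  rw [h1, ← List.foldl_filter, ← List.foldl_map]

lemma pvIdx_inner (kl : List String) (i0 : Int) (d : PySem.Dict String (PySem.Set Int))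
    (k : String) (i : Int) :
    i ∈ (kl.foldl (fun (d : PySem.Dict String (PySem.Set Int)) k' =>
        d.modify k' PySem.Set.empty (fun s => PySem.Set.add s i0)) d).getD k PySem.Set.empty
    ↔ i ∈ d.getD k PySem.Set.empty ∨ (k ∈ kl ∧ i = i0) := by
  induction kl generalizing d with
  | nil => simp
  | cons k' rest ih =>
    simp only [List.foldl_cons, ih, List.mem_cons]
    rw [PySem.Dict.getD_modify]
    by_cases h : k = k'
    · subst h
      rw [if_pos rfl, PySem.Set.mem_add]
      tauto
    · rw [if_neg h]
      tauto

lemma pvIdx_outer (ps : List (Int × String)) (d : PySem.Dict String (PySem.Set Int))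
    (k : String) (i : Int) :
    i ∈ (ps.foldl (fun d ir => (pvKmers ir.2).foldl
        (fun (d : PySem.Dict String (PySem.Set Int)) k' =>
          d.modify k' PySem.Set.empty (fun s => PySem.Set.add s ir.1)) d) d).getD k PySem.Set.empty
    ↔ i ∈ d.getD k PySem.Set.empty ∨ ∃ p ∈ ps, p.1 = i ∧ k ∈ pvKmers p.2 := by
  induction ps generalizing d with
  | nil => simp
  | cons p rest ih =>
    simp only [List.foldl_cons, ih, pvIdx_inner, List.mem_cons]
    constructor
    · rintro ((h | ⟨hk, hi⟩) | ⟨q, hq, h1, h2⟩)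
      · exact Or.inl h
      · exact Or.inr ⟨p, Or.inl rfl, hi.symm, hk⟩
      · exact Or.inr ⟨q, Or.inr hq, h1, h2⟩
    · rintro (h | ⟨q, (rfl | hq), h1, h2⟩)
      · exact Or.inl (Or.inl h)
      · exact Or.inl (Or.inr ⟨h2, h1.symm⟩)
      · exact Or.inr ⟨q, hq, h1, h2⟩

lemma pvRange_sub15 (s : String) :
    PySem.List.pyRange 0 (PySem.Str.len s - 15) 1 = PySem.List.pyRange 0 (PySem.Str.len s - 16 + 1) 1 := by
  have h : PySem.Str.len s - 15 = PySem.Str.len s - 16 + 1 := by omega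
  rw [h]

lemma pvMem_pvIndexB (reads : List String) (k : String) (i : Int) :
    i ∈ (pvIndexB reads).getD k PySem.Set.empty
    ↔ ∃ p ∈ PySem.List.enumerate reads 0, p.1 = i ∧ k ∈ pvKmers p.2 := by
  unfold pvIndexB
  have h1 : (fun (idx : PySem.Dict String (PySem.Set Int)) (ir : Int × String) =>
      (PySem.List.pyRange 0 (PySem.Str.len ir.2 - 15) 1).foldl
        (fun (idx : PySem.Dict String (PySem.Set Int)) j =>
          idx.modify (PySem.Str.slice ir.2 (some j) (some (j + 16))) PySem.Set.empty
            (fun s => PySem.Set.add s ir.1)) idx)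
      = (fun idx ir => (pvKmers ir.2).foldl
          (fun (idx : PySem.Dict String (PySem.Set Int)) k' =>
            idx.modify k' PySem.Set.empty (fun s => PySem.Set.add s ir.1)) idx) := by
    funext idx ir
    rw [pvRange_sub15, pvKmers, List.foldl_map]
  rw [h1, pvIdx_outer]
  have h2 : i ∈ (PySem.Dict.empty : PySem.Dict String (PySem.Set Int)).getD k PySem.Set.empty ↔ False := by
    simp [PySem.Dict.empty, PySem.Dict.getD, PySem.Dict.get?, PySem.Set.empty]
  rw [h2, false_or]

lemma pvHits_aux (reads : List String) (kl : List String) (s : PySem.Set Int) (i : Int) :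
    i ∈ kl.foldl (fun (s : PySem.Set Int) k =>
        PySem.Set.update s ((pvIndexB reads).getD k PySem.Set.empty)) s
    ↔ i ∈ s ∨ ∃ k ∈ kl, i ∈ (pvIndexB reads).getD k PySem.Set.empty := by
  induction kl generalizing s with
  | nil => simp
  | cons k rest ih =>
    simp only [List.foldl_cons, ih, PySem.Set.mem_update, List.mem_cons]
    constructor
    · rintro ((h | h) | ⟨k', hk', h⟩)
      · exact Or.inl h
      · exact Or.inr ⟨k, Or.inl rfl, h⟩
      · exact Or.inr ⟨k', Or.inr hk', h⟩
    · rintro (h | ⟨k', (rfl | hk'), h⟩)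
      · exact Or.inl (Or.inl h)
      · exact Or.inl (Or.inr h)
      · exact Or.inr ⟨k', hk', h⟩

lemma pvHits_nodup (reads : List String) (kl : List String) (s : PySem.Set Int) (h : s.Nodup) :
    (kl.foldl (fun (s : PySem.Set Int) k =>
        PySem.Set.update s ((pvIndexB reads).getD k PySem.Set.empty)) s).Nodup := by
  induction kl generalizing s with
  | nil => exact h
  | cons k rest ih => exact ih _ (PySem.Set.nodup_update _ _ h)

-- the hits set of genome g, as B computes it
def pvHits (reads : List String) (g : String) : PySem.Set Int :=
  (pvKmers g).foldl (fun (s : PySem.Set Int) k =>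
    PySem.Set.update s ((pvIndexB reads).getD k PySem.Set.empty)) PySem.Set.empty

lemma pvMatched_pairwise (reads : List String) (g : String) :
    (pvMatched reads g).Pairwise (· < ·) := by
  unfold pvMatched
  rw [List.pairwise_map]
  exact (PySem.List.pairwise_lt_enumerate reads 0).filter _

lemma pvMem_matched (reads : List String) (g : String) (i : Int) :
    i ∈ pvMatched reads g ↔ ∃ p ∈ PySem.List.enumerate reads 0,
      p.1 = i ∧ ∃ k ∈ pvKmers p.2, k ∈ pvKmers g := by
  unfold pvMatched
  simp only [List.mem_map, List.mem_filter, List.any_eq_true, List.contains_iff_mem]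
  constructor
  · rintro ⟨p, ⟨hp, hk⟩, rfl⟩
    exact ⟨p, hp, rfl, hk⟩
  · rintro ⟨p, hp, rfl, hk⟩
    exact ⟨p, ⟨hp, hk⟩, rfl⟩

lemma pvMem_hits (reads : List String) (g : String) (i : Int) :
    i ∈ pvHits reads g ↔ i ∈ pvMatched reads g := by
  rw [pvHits, pvHits_aux, pvMem_matched]
  have h0 : i ∈ (PySem.Set.empty : PySem.Set Int) ↔ False := by simp [PySem.Set.empty]
  rw [h0, false_or]
  constructor
  · rintro ⟨k, hkg, h⟩
    rw [pvMem_pvIndexB] at h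
    obtain ⟨p, hp, h1, h2⟩ := h
    exact ⟨p, hp, h1, k, h2, hkg⟩
  · rintro ⟨p, hp, h1, k, h2, hkg⟩
    exact ⟨k, hkg, (pvMem_pvIndexB reads k i).mpr ⟨p, hp, h1, h2⟩⟩

lemma pvSorted_hits (reads : List String) (g : String) :
    PySem.List.sorted (pvHits reads g) (fun x => x) false = pvMatched reads g := by
  apply PySem.List.sorted_eq_of_perm_of_pairwise_lt
  · apply (List.perm_ext_iff_of_nodup ?_ ?_).mpr
    · intro x
      exact (pvMem_hits reads g x).symm
    · exact (pvMatched_pairwise reads g).imp ne_of_lt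
    · exact pvHits_nodup reads _ _ List.nodup_nil
  · exact pvMatched_pairwise reads g

lemma pvHits_empty_iff (reads : List String) (g : String) :
    (pvHits reads g).isEmpty = true ↔ pvMatched reads g = [] := by
  rw [List.isEmpty_iff, List.eq_nil_iff_forall_not_mem, List.eq_nil_iff_forall_not_mem]
  constructor
  · intro h x hx
    exact h x ((pvMem_hits reads g x).mpr hx)
  · intro h x hx
    exact h x ((pvMem_hits reads g x).mp hx)

lemma pvInsert_modify (d : PySem.Dict Int (List Int)) (k : Int) (v : List Int)
    (f : List Int → List Int) : (d.insert k v).modify k [] f = d.insert k (f v) := by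
  rw [PySem.Dict.modify, PySem.Dict.getD_insert_self, PySem.Dict.insert_insert_self]

lemma pvG2r_fold (gn : Int) (l : List Int) (d : PySem.Dict Int (List Int)) (v : List Int) :
    l.foldl (fun (d : PySem.Dict Int (List Int)) i =>
        (if d.contains gn then d else d.insert gn []).modify gn [] (fun a => a ++ [i]))
      (d.insert gn v) = d.insert gn (v ++ l) := by
  induction l generalizing v with
  | nil => simp
  | cons i rest ih =>
    have hc : (d.insert gn v).contains gn = true := by
      rw [PySem.Dict.contains_insert]; simp
    simp only [List.foldl_cons, hc, if_true, pvInsert_modify, ih]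
    congr 1
    simp

lemma pvG2r_total (gn : Int) (l : List Int) (d : PySem.Dict Int (List Int))
    (hc : d.contains gn = false) (hne : l ≠ []) :
    l.foldl (fun (d : PySem.Dict Int (List Int)) i =>
        (if d.contains gn then d else d.insert gn []).modify gn [] (fun a => a ++ [i])) d
      = d.insert gn l := by
  cases l with
  | nil => exact absurd rfl hne
  | cons i rest =>
    simp only [List.foldl_cons, hc, Bool.false_eq_true, if_false, pvInsert_modify, pvG2r_fold,
      List.nil_append, List.singleton_append]

lemma pvR2g_step_eq (gn : Int) (d : PySem.Dict Int (List Int)) (i : Int) :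
    (d.setdefault i []).modify i [] (fun l => l ++ [gn])
      = (if d.contains i then d else d.insert i []).modify i [] (fun l => l ++ [gn]) := by
  by_cases h : d.contains i = true
  · rw [PySem.Dict.setdefault_of_contains _ _ h, h]
    simp
  · have h' : d.contains i = false := by simpa using h
    rw [PySem.Dict.setdefault_of_not_contains _ _ h', h']
    simp

lemma pvFoldUpd (gn : Int) (l : List Int)
    (st : PySem.Dict Int (List Int) × PySem.Dict Int (List Int)) :
    l.foldl (pvUpd gn) st =
      (l.foldl (fun (d : PySem.Dict Int (List Int)) i =>
          (if d.contains i then d else d.insert i []).modify i [] (fun a => a ++ [gn])) st.1,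
       l.foldl (fun (d : PySem.Dict Int (List Int)) i =>
          (if d.contains gn then d else d.insert gn []).modify gn [] (fun a => a ++ [i])) st.2) := by
  obtain ⟨a, b⟩ := st
  show List.foldl (fun s e =>
      ((if s.1.contains e then s.1 else s.1.insert e []).modify e [] (fun a => a ++ [gn]),
       (if s.2.contains gn then s.2 else s.2.insert gn []).modify gn [] (fun a => a ++ [e]))) (a, b) l = _
  exact PySem.List.foldl_prod_mk
    (fun d i => (if d.contains i then d else d.insert i []).modify i [] (fun a => a ++ [gn]))
    (fun d i => (if d.contains gn then d else d.insert gn []).modify gn [] (fun a => a ++ [i])) l a b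

lemma pvStepB_eq (reads : List String) (gp : Int × String)
    (st : PySem.Dict Int (List Int) × PySem.Dict Int (List Int))
    (h : st.2.contains gp.1 = false) :
    pvGenomeStepB (pvIndexB reads) st gp = (pvMatched reads gp.2).foldl (pvUpd gp.1) st := by
  have hh : (PySem.List.pyRange 0 (PySem.Str.len gp.2 - 15) 1).foldl
      (fun (hits : PySem.Set Int) i =>
        PySem.Set.update hits
          ((pvIndexB reads).getD (PySem.Str.slice gp.2 (some i) (some (i + 16))) PySem.Set.empty))
      PySem.Set.empty = pvHits reads gp.2 := by
    rw [pvRange_sub15, pvHits, pvKmers, List.foldl_map]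
  simp only [pvGenomeStepB]
  rw [hh, pvSorted_hits]
  by_cases hm : pvMatched reads gp.2 = []
  · rw [if_pos ((pvHits_empty_iff reads gp.2).mpr hm), hm, List.foldl_nil]
  · rw [if_neg (by rw [pvHits_empty_iff]; exact hm)]
    rw [pvFoldUpd]
    have hr : (fun (d : PySem.Dict Int (List Int)) i =>
        (d.setdefault i []).modify i [] (fun l => l ++ [gp.1]))
        = (fun (d : PySem.Dict Int (List Int)) i =>
          (if d.contains i then d else d.insert i []).modify i [] (fun a => a ++ [gp.1])) := by
      funext d i
      exact pvR2g_step_eq gp.1 d i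
    rw [hr, pvG2r_total gp.1 _ _ h hm]

lemma pvStepCanon_snd (reads : List String) (gp : Int × String)
    (st : PySem.Dict Int (List Int) × PySem.Dict Int (List Int))
    (h : st.2.contains gp.1 = false) (k : Int) :
    ((pvMatched reads gp.2).foldl (pvUpd gp.1) st).2.contains k
      = ((decide (pvMatched reads gp.2 ≠ []) && k == gp.1) || st.2.contains k) := by
  rw [pvFoldUpd]
  by_cases hm : pvMatched reads gp.2 = []
  · simp [hm]
  · rw [pvG2r_total gp.1 _ _ h hm]
    show (st.2.insert gp.1 (pvMatched reads gp.2)).contains k = _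
    rw [PySem.Dict.contains_insert]
    simp [hm]

lemma pvMaster (reads : List String) (l : List (Int × String))
    (st : PySem.Dict Int (List Int) × PySem.Dict Int (List Int))
    (hnd : (l.map (fun p => p.1)).Nodup)
    (h : ∀ gp ∈ l, st.2.contains gp.1 = false) :
    l.foldl (fun st gp => (pvMatched reads gp.2).foldl (pvUpd gp.1) st) st
      = l.foldl (pvGenomeStepB (pvIndexB reads)) st := by
  induction l generalizing st with
  | nil => rfl
  | cons gp rest ih =>
    rw [List.map_cons, List.nodup_cons] at hnd
    obtain ⟨hni, hrest⟩ := hnd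
    simp only [List.foldl_cons]
    have h0 : st.2.contains gp.1 = false := h gp List.mem_cons_self
    rw [pvStepB_eq reads gp st h0]
    refine ih _ hrest ?_
    intro gp' hgp'
    rw [pvStepCanon_snd reads gp st h0]
    have hne : (gp'.1 == gp.1) = false := by
      simp only [beq_eq_false_iff_ne, ne_eq]
      intro he
      exact hni (he ▸ (List.mem_map.mpr ⟨gp', hgp', rfl⟩))
    rw [hne, h gp' (List.mem_cons_of_mem _ hgp')]
    simp

-- ===== VERDICT =====
theorem map_genomes_spec : Claim_equal_map_genomes := by
  intro reads genomes _
  simp only [Spec_map_genomes, map_genomes, map_genomes_alt]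
  have h1 : (PySem.Dict.ofList genomes).items.foldl (pvGenomeStepA reads)
      (PySem.Dict.empty, PySem.Dict.empty)
      = (PySem.Dict.ofList genomes).items.foldl (pvGenomeStepB (pvIndexB reads))
      (PySem.Dict.empty, PySem.Dict.empty) := by
    have hA : (pvGenomeStepA reads)
        = (fun st (gp : Int × String) => (pvMatched reads gp.2).foldl (pvUpd gp.1) st) := by
      funext st gp
      exact pvStepA_eq reads gp st
    rw [hA]
    apply pvMaster
    · have hk := PySem.Dict.nodup_keys_ofList genomes
      simpa [PySem.Dict.keys] using hk
    · intro gp _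
      rfl
  rw [h1]
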